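-- pv_equiv track=rewrite | github.com/Charlarthebar/Pokerbot | python_skeleton/player.py | is_good_preflop
-- ===== SOURCE A (Python) =====
-- def is_good_preflop(cards):
--     '''
--     Returns True if hand is:
--     - Trips
--     - Pair (55+)
--     - 3 of the same suit AND sum of card values >= 25
--     '''
--     rank_map = {r: i for i, r in enumerate("23456789TJQKA")}
--     ranks = [rank_map[c[0]] for c in cards]
--     suits = [c[1] for c in cards]
--
--     # Count rank frequencies
--     rank_counts = {}
--     for r in ranks:
--         rank_counts[r] = rank_counts.get(r, 0) + 1
--
--     is_pair = False
--     is_trips = False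
--     pair_rank = -1
--
--     for r, count in rank_counts.items():
--         if count == 2:
--             is_pair = True
--             pair_rank = r
--         elif count == 3:
--             is_trips = True
--
--     # 1. Pairs / Trips Logic
--     if is_trips:
--         return True
--
--     if is_pair:
--         # If pair is 2, 3, or 4 (indices 0, 1, 2), fold
--         if pair_rank <= 2:
--             return False
--         # Otherwise (55+), it's good
--         return True
--
--     # 2. Suited Logic (Flush potential)
--     if len(set(suits)) == 1:
--         # Sum of face values (2=2 ... A=14)
--         total_val = sum(r + 2 for r in ranks)
--         if total_val >= 25:
--             return True
--         else:
--             return False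
--
--     return False
-- ===== SOURCE B (Python) =====
-- def judge(ranks, pair_rank, suited_ok):
--     # recursively strip every copy of the leading rank
--     if not ranks:
--         return pair_rank > 2 if pair_rank is not None else suited_ok
--     rest = [x for x in ranks if x != ranks[0]]
--     n = len(ranks) - len(rest)
--     if n == 3:
--         return True
--     return judge(rest, ranks[0] if n == 2 else pair_rank, suited_ok)
--
-- def is_good_preflop(cards):
--     ranks = ["23456789TJQKA".index(c[0]) for c in cards]
--     suits = set(c[1] for c in cards)
--     return judge(ranks, None, len(suits) == 1 and sum(ranks) + 2 * len(ranks) >= 25)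
-- ===== Notes on version B (the rewrite author's own statement) =====
-- stated objective: alternative
-- what changed: Replaces A's frequency dict and its items() flag loop by a recursive partition: judge() repeatedly strips every copy of the leading rank, deciding trips immediately and carrying the deciding pair rank as an accumulator; the suited/sum verdict is precomputed once and passed in.
import Mathlib
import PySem

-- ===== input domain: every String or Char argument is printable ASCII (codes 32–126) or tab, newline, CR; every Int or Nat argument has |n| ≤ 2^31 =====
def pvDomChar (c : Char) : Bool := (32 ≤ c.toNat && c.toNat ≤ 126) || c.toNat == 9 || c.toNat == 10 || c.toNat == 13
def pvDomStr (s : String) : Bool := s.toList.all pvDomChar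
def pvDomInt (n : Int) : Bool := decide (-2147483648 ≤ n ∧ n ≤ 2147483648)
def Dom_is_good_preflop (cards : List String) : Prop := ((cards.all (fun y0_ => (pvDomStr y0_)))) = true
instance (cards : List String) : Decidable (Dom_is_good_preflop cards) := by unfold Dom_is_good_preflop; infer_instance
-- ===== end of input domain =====

-- B replaces A's frequency dict + items()/flags loop by a recursive partition that strips all copies of the leading rank (alternative decomposition; not faster).

-- ===== PORT A =====
-- rank_map = {r: i for i, r in enumerate("23456789TJQKA")}
def pvRankMapA : PySem.Dict Char Int :=
  (PySem.List.enumerate "23456789TJQKA".toList 0).foldl (fun d p => d.insert p.2 p.1) PySem.Dict.empty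

-- the body of A after ranks/suits have been extracted
def pvCoreA (ranks : List Int) (suits : List Char) : Bool :=
  let rank_counts : PySem.Dict Int Int :=
    ranks.foldl (fun d r => d.insert r (d.getD r 0 + 1)) PySem.Dict.empty
  let st := rank_counts.items.foldl
    (fun (st : Bool × Bool × Int) p =>
      if p.2 == 2 then (true, st.2.1, p.1)
      else if p.2 == 3 then (st.1, true, st.2.2)
      else st) (false, false, -1)
  if st.2.1 then true
  else if st.1 then (if st.2.2 ≤ 2 then false else true)
  else if (PySem.Set.ofList suits).length == 1 then
    (if 25 ≤ ranks.foldl (fun s r => s + (r + 2)) 0 then true else false)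
  else false

def is_good_preflop (cards : List String) : Bool :=
  -- ranks = [rank_map[c[0]] for c in cards]; suits = [c[1] for c in cards]; none = IndexError/KeyError, excluded by Pre_
  match cards.mapM (fun c => (PySem.Str.pyGet? c 0).bind (fun ch => pvRankMapA.get? ch)),
        cards.mapM (fun c => PySem.Str.pyGet? c 1) with
  | some ranks, some suits => pvCoreA ranks suits
  | _, _ => false

-- ===== PORT B =====
-- def judge(ranks, pair_rank, suited_ok): strips all copies of ranks[0] each step
def pvJudge (ranks : List Int) (pair_rank : Option Int) (suited_ok : Bool) : Bool :=
  match ranks with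
  | [] => match pair_rank with | some v => decide (2 < v) | none => suited_ok
  | r :: t =>
    let rest := (r :: t).filter (fun x => x != r)
    let n := (r :: t).length - rest.length
    if n == 3 then true
    else pvJudge rest (if n == 2 then some r else pair_rank) suited_ok
termination_by ranks.length
decreasing_by
  simp only [List.filter_cons, bne_self_eq_false, Bool.false_eq_true, if_false, List.length_cons]
  exact Nat.lt_succ_of_le (List.length_filter_le _ _)

def is_good_preflop_alt (cards : List String) : Bool :=
  -- ranks = ["23456789TJQKA".index(c[0]) for c in cards] (ValueError/IndexError excluded by Pre_); suits = set(c[1] for c in cards)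
  match cards.mapM (fun c => PySem.Str.pyGet? c 0) with
  | none => false
  | some fs =>
    let ranks := fs.map (fun ch => PySem.Str.find "23456789TJQKA" (String.ofList [ch]))
    match cards.mapM (fun c => PySem.Str.pyGet? c 1) with
    | none => false
    | some sl =>
      pvJudge ranks none
        ((PySem.Set.ofList sl).length == 1 && decide (25 ≤ ranks.sum + 2 * (ranks.length : Int)))

-- ===== PRECONDITION & SPEC =====
-- A raises (IndexError/KeyError) on any card shorter than 2 characters or whose first character is not one of
-- the rank characters "23456789TJQKA"; exactly those inputs are excluded.
def Pre_is_good_preflop (cards : List String) : Prop :=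
  ∀ c ∈ cards, 2 ≤ c.toList.length ∧ c.toList.headI ∈ "23456789TJQKA".toList
instance (cards : List String) : Decidable (Pre_is_good_preflop cards) := by
  unfold Pre_is_good_preflop; infer_instance
def pvWitness_is_good_preflop : List String := (["Ah", "Kh", "Qh"])

def Spec_is_good_preflop (cards : List String) (out : Bool) : Prop := out = is_good_preflop_alt cards
instance (cards : List String) (out : Bool) : Decidable (Spec_is_good_preflop cards out) := by
  unfold Spec_is_good_preflop; infer_instance

-- ===== CLAIM (what is proved, stated in full; the proofs are below) =====
def Claim_equal_is_good_preflop : Prop := ∀ (cards : List String), Dom_is_good_preflop cards → Pre_is_good_preflop cards → Spec_is_good_preflop cards (is_good_preflop cards)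

-- ===== LEMMAS AND PROOFS =====

-- the "last element satisfying p" accumulator A's pair_rank reduces to
def pvFB (p : Int → Bool) (acc : Option Int) (k : Int) : Option Int := if p k then some k else acc

theorem pvFB_or (p : Int → Bool) : ∀ (S : List Int) (acc : Option Int),
    S.foldl (pvFB p) acc = (S.foldl (pvFB p) none).or acc := by
  intro S
  induction S with
  | nil => intro acc; simp
  | cons k S ih =>
    intro acc
    simp only [List.foldl_cons, pvFB]
    by_cases h : p k = true
    · simp [h, ih (some k)]
    · simp only [Bool.not_eq_true] at h
      simp [h, ih acc]

theorem pvFB_none_iff (p : Int → Bool) : ∀ (S : List Int),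
    (S.foldl (pvFB p) none = none) ↔ S.any p = false := by
  intro S
  induction S with
  | nil => simp
  | cons k S ih =>
    simp only [List.foldl_cons, List.any_cons, pvFB]
    rw [pvFB_or p S]
    by_cases h : p k = true
    · simp [h]
    · simp only [Bool.not_eq_true] at h
      simp [h, ih]

-- the state-update of A's items() loop (p2/p3 = "count is 2"/"count is 3")
def pvFA (p2 p3 : Int → Bool) (st : Bool × Bool × Int) (k : Int) : Bool × Bool × Int :=
  if p2 k then (true, st.2.1, k) else if p3 k then (st.1, true, st.2.2) else st

theorem pvFA_pair (p2 p3 : Int → Bool) : ∀ (S : List Int) (st : Bool × Bool × Int),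
    (S.foldl (pvFA p2 p3) st).1 = (st.1 || S.any p2) := by
  intro S
  induction S with
  | nil => intro st; simp
  | cons k S ih =>
    intro st
    simp only [List.foldl_cons, List.any_cons, pvFA]
    by_cases h2 : p2 k = true
    · simp [h2, ih]
    · simp only [Bool.not_eq_true] at h2
      by_cases h3 : p3 k = true
      · simp [h2, h3, ih]
      · simp only [Bool.not_eq_true] at h3
        simp [h2, h3, ih]

theorem pvFA_trips (p2 p3 : Int → Bool) (hd : ∀ k, p2 k = true → p3 k = false) :
    ∀ (S : List Int) (st : Bool × Bool × Int),
    (S.foldl (pvFA p2 p3) st).2.1 = (st.2.1 || S.any p3) := by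
  intro S
  induction S with
  | nil => intro st; simp
  | cons k S ih =>
    intro st
    simp only [List.foldl_cons, List.any_cons, pvFA]
    by_cases h2 : p2 k = true
    · simp [h2, hd k h2, ih]
    · simp only [Bool.not_eq_true] at h2
      by_cases h3 : p3 k = true
      · simp [h2, h3, ih]
      · simp only [Bool.not_eq_true] at h3
        simp [h2, h3, ih]

theorem pvFA_rank (p2 p3 : Int → Bool) : ∀ (S : List Int) (st : Bool × Bool × Int),
    (S.foldl (pvFA p2 p3) st).2.2 = (S.foldl (pvFB p2) none).getD st.2.2 := by
  intro S
  induction S with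
  | nil => intro st; simp
  | cons k S ih =>
    intro st
    simp only [List.foldl_cons, pvFA, pvFB]
    by_cases h2 : p2 k = true
    · simp only [h2, if_true, ih]
      rw [pvFB_or p2 S (some k)]
      cases S.foldl (pvFB p2) none with
      | none => simp
      | some w => simp
    · simp only [Bool.not_eq_true] at h2
      by_cases h3 : p3 k = true
      · simp [h2, h3, ih]
      · simp only [Bool.not_eq_true] at h3
        simp [h2, h3, ih]

theorem pvItemsFold (ranks : List Int) :
    ((ranks.foldl (fun d r => d.insert r (d.getD r 0 + 1)) (PySem.Dict.empty : PySem.Dict Int Int)).items.foldl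
      (fun (st : Bool × Bool × Int) p =>
        if p.2 == 2 then (true, st.2.1, p.1)
        else if p.2 == 3 then (st.1, true, st.2.2)
        else st) (false, false, (-1 : Int)))
    = ((PySem.Set.ofList ranks).any (fun k => ((ranks.count k : Int) == 2)),
       (PySem.Set.ofList ranks).any (fun k => ((ranks.count k : Int) == 3)),
       ((PySem.Set.ofList ranks).foldl (pvFB (fun k => ((ranks.count k : Int) == 2))) none).getD (-1)) := by
  change ((PySem.Dict.counter ranks).items.foldl
      (fun (st : Bool × Bool × Int) p =>
        if p.2 == 2 then (true, st.2.1, p.1)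
        else if p.2 == 3 then (st.1, true, st.2.2)
        else st) (false, false, (-1 : Int))) = _
  rw [PySem.Dict.items_counter, List.foldl_map]
  have hfa : ((PySem.Set.ofList ranks).foldl
      (fun (st : Bool × Bool × Int) k =>
        if ((ranks.count k : Int) == 2) then (true, st.2.1, k)
        else if ((ranks.count k : Int) == 3) then (st.1, true, st.2.2)
        else st) (false, false, (-1 : Int)))
      = ((PySem.Set.ofList ranks).foldl
          (pvFA (fun k => ((ranks.count k : Int) == 2)) (fun k => ((ranks.count k : Int) == 3)))
          (false, false, (-1 : Int))) := rfl
  have hdisj : ∀ k, ((ranks.count k : Int) == 2) = true → ((ranks.count k : Int) == 3) = false := by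
    intro k h
    rw [beq_iff_eq] at h
    rw [beq_eq_false_iff_ne]
    omega
  refine Eq.trans (Eq.trans rfl hfa) ?_
  refine Prod.ext ?_ (Prod.ext ?_ ?_)
  · simpa using pvFA_pair _ _ (PySem.Set.ofList ranks) (false, false, (-1 : Int))
  · simpa using pvFA_trips _ _ hdisj (PySem.Set.ofList ranks) (false, false, (-1 : Int))
  · simpa using pvFA_rank _ _ (PySem.Set.ofList ranks) (false, false, (-1 : Int))

theorem pvSum (ranks : List Int) : ∀ (a : Int),
    ranks.foldl (fun s r => s + (r + 2)) a = a + ranks.sum + 2 * (ranks.length : Int) := by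
  induction ranks with
  | nil => intro a; simp
  | cons r rest ih =>
    intro a
    simp only [List.foldl_cons, List.sum_cons, List.length_cons, ih]
    push_cast
    ring

-- dropping all copies of the leading rank drops exactly count-of-it elements
theorem pvLenFilterNe (r : Int) : ∀ (t : List Int),
    ((t.filter (fun x => x != r)).length + t.count r) = t.length := by
  intro t
  induction t with
  | nil => simp
  | cons x xs ih =>
    simp only [List.filter_cons, List.count_cons, List.length_cons]
    by_cases h : x = r
    · subst h
      simp only [bne_self_eq_false, Bool.false_eq_true, if_false, beq_self_eq_true, if_true]
      omega
    · have hb : (x != r) = true := by simp [h]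
      have hb3 : (x == r) = false := by simp [h]
      simp only [hb, hb3, Bool.false_eq_true, if_true, if_false, List.length_cons]
      omega

theorem pvCountFilterNe (r k : Int) (t : List Int) (h : k ≠ r) :
    (t.filter (fun x => x != r)).count k = t.count k := by
  rw [List.count_filter]; simp [h]

theorem pvFilterOfList (p : Int → Bool) : ∀ (t : List Int),
    (PySem.Set.ofList t).filter p = PySem.Set.ofList (t.filter p) := by
  intro t
  induction t with
  | nil => simp [PySem.Set.ofList_nil]
  | cons x xs ih =>
    rw [PySem.Set.ofList_cons, List.filter_cons, PySem.Set.discard]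
    by_cases h : p x = true
    · rw [if_pos h, List.filter_cons, if_pos h, PySem.Set.ofList_cons, PySem.Set.discard, ← ih]
      rw [List.filter_comm]
    · have h' : p x = false := by simpa using h
      rw [h', if_neg (by simp), List.filter_comm, ih,
        show List.filter p (x::xs) = List.filter p xs by simp [h']]
      apply List.filter_eq_self.mpr
      intro y hy
      rw [PySem.Set.mem_ofList, List.mem_filter] at hy
      have : ¬ (y == x) = true := by
        intro hyx
        rw [beq_iff_eq] at hyx
        rw [hyx, h'] at hy
        exact Bool.false_ne_true hy.2
      simpa using this

-- set(t) minus r, as a filter of t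
theorem pvDiscardFilter (r : Int) (t : List Int) :
    (PySem.Set.ofList t).discard r = PySem.Set.ofList (t.filter (fun x => x != r)) :=
  pvFilterOfList (fun x => x != r) t

theorem pvAnyCongrMem (l : List Int) (p q : Int → Bool) (h : ∀ x ∈ l, p x = q x) :
    l.any p = l.any q := by
  rw [Bool.eq_iff_iff]
  simp only [List.any_eq_true]
  exact ⟨fun ⟨x, hx, hp⟩ => ⟨x, hx, (h x hx) ▸ hp⟩, fun ⟨x, hx, hp⟩ => ⟨x, hx, (h x hx).symm ▸ hp⟩⟩

-- what B's result is: pvJudge computed in A's count terms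
theorem pvJudgeChar : ∀ (n : Nat) (ranks : List Int), ranks.length ≤ n →
    ∀ (acc : Option Int) (ok : Bool),
    pvJudge ranks acc ok =
      (if (PySem.Set.ofList ranks).any (fun k => ((ranks.count k : Int) == 3)) then true
       else match (PySem.Set.ofList ranks).foldl (pvFB (fun k => ((ranks.count k : Int) == 2))) acc with
            | some v => decide (2 < v)
            | none => ok) := by
  intro n
  induction n with
  | zero =>
    intro ranks h acc ok
    have hnil : ranks = [] := List.eq_nil_of_length_eq_zero (Nat.le_zero.mp h)
    subst hnil
    cases acc <;> simp [pvJudge, PySem.Set.ofList_nil]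
  | succ m ih =>
    intro ranks h acc ok
    match ranks with
    | [] => cases acc <;> simp [pvJudge, PySem.Set.ofList_nil]
    | r :: t =>
      rw [pvJudge]
      have hrest : (r :: t).filter (fun x => x != r) = t.filter (fun x => x != r) := by
        simp
      set rest := t.filter (fun x => x != r) with hrestdef
      have hlenle : rest.length ≤ t.length := List.length_filter_le _ _
      have hlen : rest.length ≤ m := le_trans hlenle (by simpa using Nat.le_of_succ_le_succ h)
      have hcount : (r :: t).count r = (r :: t).length - rest.length := by
        have h1 := pvLenFilterNe r (r :: t)
        rw [hrest] at h1
        omega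
      have hset : PySem.Set.ofList (r :: t) = r :: PySem.Set.ofList rest := by
        rw [PySem.Set.ofList_cons, pvDiscardFilter]
      have hmemne : ∀ k ∈ PySem.Set.ofList rest, k ≠ r := by
        intro k hk
        rw [PySem.Set.mem_ofList, List.mem_filter] at hk
        simpa using hk.2
      have hcnt : ∀ k ∈ PySem.Set.ofList rest, (r :: t).count k = rest.count k := by
        intro k hk
        have hkr := hmemne k hk
        rw [List.count_cons, pvCountFilterNe r k t hkr]
        simp [Ne.symm hkr]
      have hb3 : (((r :: t).count r : Int) == 3) = (((r :: t).length - rest.length) == 3) := by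
        rw [hcount, Bool.eq_iff_iff, beq_iff_eq, beq_iff_eq]
        omega
      have hb2 : (((r :: t).count r : Int) == 2) = (((r :: t).length - rest.length) == 2) := by
        rw [hcount, Bool.eq_iff_iff, beq_iff_eq, beq_iff_eq]
        omega
      have hanyT : (PySem.Set.ofList rest).any (fun k => (((r :: t).count k : Int) == 3))
          = (PySem.Set.ofList rest).any (fun k => ((rest.count k : Int) == 3)) := by
        apply pvAnyCongrMem
        intro x hx
        rw [hcnt x hx]
      have hfoldP : ∀ (a : Option Int),
          (PySem.Set.ofList rest).foldl (pvFB (fun k => (((r :: t).count k : Int) == 2))) a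
          = (PySem.Set.ofList rest).foldl (pvFB (fun k => ((rest.count k : Int) == 2))) a := by
        intro a
        apply PySem.List.foldl_congr_mem
        intro a x hx
        simp only [pvFB, hcnt x hx]
      simp only [hrest, hset, List.any_cons, List.foldl_cons, hb3, hanyT, pvFB, hb2, hfoldP]
      by_cases hn3 : (r :: t).length - rest.length = 3
      · have hn3' : t.length + 1 - rest.length = 3 := by simpa using hn3
        simp [hn3']
      · have hc3 : (((r :: t).length - rest.length) == 3) = false := by simpa using hn3
        rw [hc3]
        simp only [Bool.false_eq_true, if_false, Bool.false_or]
        exact ih rest hlen _ ok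

theorem pvCore_eq (ranks : List Int) (suits : List Char) :
    pvCoreA ranks suits
      = pvJudge ranks none
          ((PySem.Set.ofList suits).length == 1 && decide (25 ≤ ranks.sum + 2 * (ranks.length : Int))) := by
  rw [pvJudgeChar ranks.length ranks (le_refl _)]
  simp only [pvCoreA, pvItemsFold, pvSum ranks 0, zero_add]
  by_cases h3 : (PySem.Set.ofList ranks).any (fun k => ((ranks.count k : Int) == 3))
  · simp [h3]
  · have h3' : (PySem.Set.ofList ranks).any (fun k => ((ranks.count k : Int) == 3)) = false := by
      simpa using h3
    rw [h3']
    cases hfold : (PySem.Set.ofList ranks).foldl (pvFB (fun k => ((ranks.count k : Int) == 2))) none with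
    | some v =>
      have hany2 : (PySem.Set.ofList ranks).any (fun k => ((ranks.count k : Int) == 2)) = true := by
        by_contra hh
        rw [Bool.not_eq_true, ← pvFB_none_iff, hfold] at hh
        simp at hh
      simp only [hany2, Bool.false_eq_true, if_false, if_true, Option.getD_some]
      by_cases hv : v ≤ 2
      · have : ¬ (2 : Int) < v := by omega
        simp [hv, this]
      · have : (2 : Int) < v := by omega
        simp [hv, this]
    | none =>
      have hany2 : (PySem.Set.ofList ranks).any (fun k => ((ranks.count k : Int) == 2)) = false :=
        (pvFB_none_iff _ _).mp hfold
      simp only [hany2, Bool.false_eq_true, if_false]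
      cases hs1 : ((PySem.Set.ofList suits).length == 1) with
      | false => simp
      | true =>
        by_cases hsum : 25 ≤ ranks.sum + 2 * (ranks.length : Int)
        · simp [hsum]
        · simp [hsum]

-- B's rank of a first character: "23456789TJQKA".index(c[0])
def pvRk (ch : Char) : Int := PySem.Str.find "23456789TJQKA" (String.ofList [ch])

theorem pvCharIdx : ∀ a ∈ "23456789TJQKA".toList, pvRankMapA.get? a = some (pvRk a) := by
  intro a ha
  have hall := of_decide_eq_true (by decide :
    decide (("23456789TJQKA".toList.all (fun a => pvRankMapA.get? a == some (pvRk a))) = true) = true)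
  rw [List.all_eq_true] at hall
  exact beq_iff_eq.mp (hall a ha)

theorem pvExtract : ∀ (cards : List String),
    (∀ c ∈ cards, 2 ≤ c.toList.length ∧ c.toList.headI ∈ "23456789TJQKA".toList) →
    ∃ fs suits,
      cards.mapM (fun c => PySem.Str.pyGet? c 0) = some fs ∧
      cards.mapM (fun c => (PySem.Str.pyGet? c 0).bind (fun ch => pvRankMapA.get? ch)) = some (fs.map pvRk) ∧
      cards.mapM (fun c => PySem.Str.pyGet? c 1) = some suits := by
  intro cards
  induction cards with
  | nil => intro _; exact ⟨[], [], by simp, by simp, by simp⟩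
  | cons c cs ih =>
    intro h
    obtain ⟨hlen, hmem⟩ := h c (List.mem_cons_self ..)
    obtain ⟨fs, suits, h1, h2, h3⟩ := ih (fun d hd => h d (List.mem_cons_of_mem _ hd))
    obtain ⟨a, b, t, hct⟩ : ∃ a b t, c.toList = a :: b :: t := by
      match hcl : c.toList with
      | [] => rw [hcl] at hlen; simp at hlen
      | [a] => rw [hcl] at hlen; simp at hlen
      | a :: b :: t => exact ⟨a, b, t, rfl⟩
    rw [hct] at hmem
    simp only [List.headI] at hmem
    simp only [PySem.Str.pyGet?_eq, PySem.Chars.pyGet?_eq_listPyGet?] at h1 h2 h3 ⊢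
    have hg0 : PySem.List.pyGet? c.toList 0 = some a := by
      rw [hct]
      simp [PySem.List.pyGet?_zero_cons]
    have hg1 : PySem.List.pyGet? c.toList 1 = some b := by
      rw [hct, show (1 : Int) = ((1 : Nat) : Int) from rfl, PySem.List.pyGet?_natCast]
      simp
    refine ⟨a :: fs, b :: suits, ?_, ?_, ?_⟩
    · simp [List.mapM_cons, hg0, h1]
    · simp [List.mapM_cons, hg0, h2, pvCharIdx a hmem]
    · simp [List.mapM_cons, hg1, h3]

-- ===== VERDICT (by name: the statement is the Claim_ definition above) =====
theorem is_good_preflop_spec : Claim_equal_is_good_preflop := by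
  intro cards _ hpre
  unfold Spec_is_good_preflop
  obtain ⟨fs, suits, h1, h2, h3⟩ := pvExtract cards hpre
  simp only [is_good_preflop, is_good_preflop_alt, h1, h2, h3]
  exact pvCore_eq _ _
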